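-- pv_equiv track=rewrite | github.com/Estebanadm/Medical-Imaging-Data-Processing-Tools | tools/video_creator.py | find_crop_and_other_folder
-- ===== SOURCE A (Python) =====
-- def find_crop_and_other_folder(folders):
--     crop_folder = None
--     other_folder = None
--
--     for folder in folders:
--         if 'crop' in folder.lower():
--             crop_folder = folder
--         else:
--             other_folder = folder
--
--     return crop_folder, other_folder
-- ===== SOURCE B (Python) =====
-- def find_crop_and_other_folder(folders):
--     crop_folder = None
--     other_folder = None
--     for folder in reversed(folders):
--         if crop_folder is not None and other_folder is not None:
--             break
--         if 'crop' in folder.lower():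
--             if crop_folder is None:
--                 crop_folder = folder
--         elif other_folder is None:
--             other_folder = folder
--     return crop_folder, other_folder
-- ===== Notes on version B (the rewrite author's own statement) =====
-- stated objective: alternative
-- what changed: Replaced the forward overwrite-last scan by a backward first-match search that stops early once both a crop and a non-crop folder have been found.
import Mathlib
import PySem

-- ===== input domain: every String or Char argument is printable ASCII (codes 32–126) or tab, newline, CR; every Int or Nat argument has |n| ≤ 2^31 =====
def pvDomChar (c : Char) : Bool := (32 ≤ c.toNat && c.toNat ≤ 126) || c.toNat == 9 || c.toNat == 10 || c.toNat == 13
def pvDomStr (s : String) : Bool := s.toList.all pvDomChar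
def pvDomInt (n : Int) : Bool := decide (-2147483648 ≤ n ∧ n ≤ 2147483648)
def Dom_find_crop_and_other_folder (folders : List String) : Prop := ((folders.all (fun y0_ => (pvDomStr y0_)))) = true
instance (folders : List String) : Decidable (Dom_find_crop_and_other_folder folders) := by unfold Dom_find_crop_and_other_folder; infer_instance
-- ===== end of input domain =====

-- Header: B scans backwards with first-match semantics and an early break instead of A's forward overwrite-last scan (objective: alternative).
-- ===== PORT A =====
def find_crop_and_other_folder (folders : List String) : Option String × Option String :=
  folders.foldl
    (fun st folder =>
      if PySem.Str.isIn "crop" (PySem.Str.lower folder) then (some folder, st.2)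
      else (st.1, some folder))
    (none, none)

-- ===== PORT B =====
-- the backward loop with early break, as structural recursion over the reversed list
def pvAltLoop : List String → Option String → Option String → Option String × Option String
  | [], c, o => (c, o)
  | f :: t, c, o =>
    if c.isSome && o.isSome then (c, o)
    else if PySem.Str.isIn "crop" (PySem.Str.lower f) then
      pvAltLoop t (if c.isNone then some f else c) o
    else
      pvAltLoop t c (if o.isNone then some f else o)

def find_crop_and_other_folder_alt (folders : List String) : Option String × Option String :=
  pvAltLoop folders.reverse none none

-- ===== PRECONDITION & SPEC =====
def Spec_find_crop_and_other_folder (folders : List String) (out : Option String × Option String) : Prop := out = find_crop_and_other_folder_alt folders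
instance (folders : List String) (out : Option String × Option String) : Decidable (Spec_find_crop_and_other_folder folders out) := by unfold Spec_find_crop_and_other_folder; infer_instance

-- ===== CLAIM =====
def Claim_equal_find_crop_and_other_folder : Prop := ∀ (folders : List String), Dom_find_crop_and_other_folder folders → Spec_find_crop_and_other_folder folders (find_crop_and_other_folder folders)

-- ===== LEMMAS AND PROOFS =====
-- B's loop: first match of each predicate in the remaining list, unless the slot is already filled
theorem pvAltLoop_eq (l : List String) (c o : Option String) :
    pvAltLoop l c o =
      (c.or (l.find? (fun f => PySem.Str.isIn "crop" (PySem.Str.lower f))),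
       o.or (l.find? (fun f => !(PySem.Str.isIn "crop" (PySem.Str.lower f))))) := by
  induction l generalizing c o with
  | nil => simp [pvAltLoop]
  | cons f t ih =>
    by_cases h : PySem.Str.isIn "crop" (PySem.Str.lower f) = true <;>
      [skip; simp only [Bool.not_eq_true] at h] <;>
      simp [PySem.Str.isIn, PySem.Str.lower] at h <;>
      cases c <;> cases o <;>
        simp [pvAltLoop, h, ih, Option.or]

-- getLast? of a cons, phrased through Option.or
theorem pv_getLast?_cons_or {α : Type} (x : α) (t : List α) (c : Option α) :
    ((x :: t).getLast?).or c = (t.getLast?).or (some x) := by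
  rw [List.getLast?_cons]
  cases h : t.getLast? <;> simp [Option.getD, Option.or]

-- A's fold from state (c, o): the last matching elements, falling back to c/o
theorem pv_fold_eq (l : List String) (c o : Option String) :
    l.foldl
      (fun st folder =>
        if PySem.Str.isIn "crop" (PySem.Str.lower folder) then (some folder, st.2)
        else (st.1, some folder))
      (c, o)
    = (((l.filter (fun f => PySem.Str.isIn "crop" (PySem.Str.lower f))).getLast?).or c,
       ((l.filter (fun f => !(PySem.Str.isIn "crop" (PySem.Str.lower f)))).getLast?).or o) := by
  induction l generalizing c o with
  | nil => simp
  | cons x t ih =>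
    by_cases h : PySem.Str.isIn "crop" (PySem.Str.lower x) = true
    · simp only [List.foldl_cons, List.filter_cons, h, Bool.not_true, if_true,
        Bool.false_eq_true, if_false, ih, pv_getLast?_cons_or]
    · simp only [List.foldl_cons, List.filter_cons, Bool.not_eq_true] at *
      simp only [h, Bool.not_false, if_true, Bool.false_eq_true, if_false, ih,
        pv_getLast?_cons_or]

-- last match forwards = first match backwards
theorem pv_getLast?_filter_eq_find?_reverse {α : Type} (p : α → Bool) (l : List α) :
    (l.filter p).getLast? = l.reverse.find? p := by
  induction l with
  | nil => rfl
  | cons x t ih =>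
    rw [List.reverse_cons, List.find?_append, List.filter_cons]
    by_cases h : p x = true
    · have hc := pv_getLast?_cons_or x (t.filter p) none
      rw [Option.or_none] at hc
      rw [if_pos h, hc, ih]
      cases ht : t.reverse.find? p <;> simp [h, Option.or]
    · simp only [Bool.not_eq_true] at h
      rw [if_neg (by simp [h]), ih]
      cases ht : t.reverse.find? p <;> simp [h, Option.or]

-- ===== VERDICT =====
theorem find_crop_and_other_folder_spec : Claim_equal_find_crop_and_other_folder := by
  intro folders _
  unfold Spec_find_crop_and_other_folder find_crop_and_other_folder find_crop_and_other_folder_alt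
  rw [pv_fold_eq, pvAltLoop_eq, Option.or_none, Option.or_none, Option.none_or, Option.none_or,
    pv_getLast?_filter_eq_find?_reverse, pv_getLast?_filter_eq_find?_reverse]
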